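-- pv_equiv track=rewrite | github.com/CESEL/BatchBuilderResearch | RQ3/batching_techniques.py | batch_stop4
-- ===== SOURCE A (Python) =====
-- def runbatch(batch):
--
--     for test in batch:
--         if (test == False):
--             return False
--     return True
--
-- def batch_stop4(batch):
--     rc =0
--     lc =0
--
--
--     if (len(batch) <= 4):
--         return len(batch)
--     else:
--         sub_batch_right = batch[0:(int)(len(batch) / 2)]
--         sub_batch_left = batch[(int)(len(batch) / 2):len(batch)]
--         if (runbatch(sub_batch_right) == False):
--             rc= batch_stop4(sub_batch_right)
--
--         if (runbatch(sub_batch_left) == False):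
--             lc= batch_stop4(sub_batch_left)
--
--         return (rc +lc +2)
-- ===== SOURCE B (Python) =====
-- def batch_stop4(batch):
--     # One pass builds a prefix count of failing tests; each "does this sub-batch
--     # contain a failure" check is then O(1), and the halving works on index
--     # ranges instead of copied slices.
--     n = len(batch)
--     pref = [0] * (n + 1)
--     for i, t in enumerate(batch):
--         pref[i + 1] = pref[i] + (0 if t else 1)
--
--     def count(lo, hi):
--         ln = hi - lo
--         if ln <= 4:
--             return ln
--         mid = lo + ln // 2
--         c = 2
--         if pref[mid] - pref[lo] > 0:
--             c += count(lo, mid)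
--         if pref[hi] - pref[mid] > 0:
--             c += count(mid, hi)
--         return c
--
--     return count(0, n)
-- ===== Notes on version B (the rewrite author's own statement) =====
-- stated objective: faster
-- what changed: B replaces A's slice-copying recursion with repeated runbatch scans by a single prefix-sum pass over failure counts plus an index-range recursion whose containment checks are O(1) and which copies nothing.
import Mathlib
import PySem

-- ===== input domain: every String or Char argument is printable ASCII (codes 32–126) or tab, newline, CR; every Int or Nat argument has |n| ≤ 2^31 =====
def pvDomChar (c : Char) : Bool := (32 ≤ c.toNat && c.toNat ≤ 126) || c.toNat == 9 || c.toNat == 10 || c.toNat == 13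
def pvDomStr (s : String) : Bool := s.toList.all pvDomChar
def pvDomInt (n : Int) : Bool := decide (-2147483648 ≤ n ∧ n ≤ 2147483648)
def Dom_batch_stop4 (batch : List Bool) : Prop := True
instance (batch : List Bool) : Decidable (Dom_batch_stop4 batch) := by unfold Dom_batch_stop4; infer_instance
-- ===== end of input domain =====

-- B replaces A's slice-copying halving recursion (which re-scans each half with
-- runbatch) by one prefix-sum pass over failure counts plus an index-range
-- recursion with O(1) containment checks.

-- ===== PORT A =====
def runbatch (batch : List Bool) : Bool :=
  match batch with
  | [] => true
  | test :: rest => if test = false then false else runbatch rest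

-- slice facts cited by the port's termination proof
theorem pv_slice_right (l : List Bool) :
    PySem.List.slice l (some 0) (some ((l.length : Int) / 2)) = l.take (l.length / 2) := by
  have hc : ((l.length : Int) / 2) = ((l.length / 2 : Nat) : Int) := by omega
  rw [hc, PySem.List.slice_zero_start, PySem.List.slice_to_natCast]

theorem pv_slice_left (l : List Bool) :
    PySem.List.slice l (some ((l.length : Int) / 2)) (some (l.length : Int))
      = l.drop (l.length / 2) := by
  have hc : ((l.length : Int) / 2) = ((l.length / 2 : Nat) : Int) := by omega
  rw [hc, PySem.List.slice_natCast, List.take_of_length_le (by simp)]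

def batch_stop4 (batch : List Bool) : Int :=
  if batch.length ≤ 4 then (batch.length : Int)
  else
    -- (int)(len(batch)/2): float division then truncation = len // 2 on this domain
    let h : Int := (batch.length : Int) / 2
    let sub_batch_right := PySem.List.slice batch (some 0) (some h)
    let sub_batch_left := PySem.List.slice batch (some h) (some (batch.length : Int))
    let rc : Int := if runbatch sub_batch_right = false then batch_stop4 sub_batch_right else 0
    let lc : Int := if runbatch sub_batch_left = false then batch_stop4 sub_batch_left else 0
    rc + lc + 2
termination_by batch.length
decreasing_by
  · rw [pv_slice_right]
    simp only [List.length_take]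
    omega
  · rw [pv_slice_left]
    simp only [List.length_drop]
    omega

-- ===== PORT B =====
-- the 'for i, t in enumerate(batch): pref[i+1] = pref[i] + (0 if t else 1)' loop
-- (run carries pref[i]; the preallocate-and-assign list is built by appending)
def prefLoop (pref : List Int) (run : Int) (l : List Bool) : List Int :=
  match l with
  | [] => pref
  | t :: rest =>
      let run' := run + (if t then 0 else 1)
      prefLoop (pref ++ [run']) run' rest

-- the inner 'count(lo, hi)'; pref indices are always in range, so getD is exact
def countAlt (pref : List Int) (lo hi : Nat) : Int :=
  let ln := hi - lo
  if ln ≤ 4 then (ln : Int)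
  else
    let mid := lo + ln / 2
    let c : Int := 2
    let c := if pref.getD mid 0 - pref.getD lo 0 > 0 then c + countAlt pref lo mid else c
    if pref.getD hi 0 - pref.getD mid 0 > 0 then c + countAlt pref mid hi else c
termination_by hi - lo
decreasing_by all_goals omega

def batch_stop4_alt (batch : List Bool) : Int :=
  let n := batch.length
  let pref := prefLoop [0] 0 batch
  countAlt pref 0 n

-- ===== PRECONDITION & SPEC =====
def Spec_batch_stop4 (batch : List Bool) (out : Int) : Prop := out = batch_stop4_alt batch
instance (batch : List Bool) (out : Int) : Decidable (Spec_batch_stop4 batch out) := by unfold Spec_batch_stop4; infer_instance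

-- ===== CLAIM (what is proved, stated in full; the proofs are below) =====
def Claim_equal_batch_stop4 : Prop := ∀ (batch : List Bool), Dom_batch_stop4 batch → Spec_batch_stop4 batch (batch_stop4 batch)

-- ===== LEMMAS AND PROOFS =====

/-- number of failing (False) tests, as an Int -/
def fCount (l : List Bool) : Int := (l.countP (fun t => !t) : Int)

theorem runbatch_eq_all (l : List Bool) : runbatch l = l.all id := by
  induction l with
  | nil => rfl
  | cons t rest ih => cases t <;> simp [runbatch, ih]

theorem runbatch_false_iff (l : List Bool) : runbatch l = false ↔ 0 < fCount l := by
  rw [runbatch_eq_all, fCount]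
  simp [List.all_eq_false, List.countP_pos_iff]

theorem prefLoop_spec (l : List Bool) (pref : List Int) (run : Int) :
    prefLoop pref run l
      = pref ++ (List.range l.length).map (fun k => run + fCount (l.take (k + 1))) := by
  induction l generalizing pref run with
  | nil => simp [prefLoop]
  | cons t rest ih =>
    rw [prefLoop, ih]
    rw [List.length_cons, List.range_succ_eq_map]
    simp only [List.map_cons, List.map_map, List.append_assoc, List.singleton_append]
    congr 1
    rw [List.cons_eq_cons]
    constructor
    · cases t <;> simp [fCount]
    · apply List.map_congr_left
      intro k _
      simp only [Function.comp_apply, List.take_succ_cons, fCount, List.countP_cons]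
      cases t <;> simp <;> ring
theorem pref_getD (batch : List Bool) (i : Nat) (hi : i ≤ batch.length) :
    (prefLoop [0] 0 batch).getD i 0 = fCount (batch.take i) := by
  rw [prefLoop_spec]
  cases i with
  | zero => simp [fCount]
  | succ k =>
    have hk : k < batch.length := by omega
    rw [List.getD_eq_getElem?_getD]
    rw [List.getElem?_append_right (by simp)]
    simp [hk]

theorem fCount_sub (batch : List Bool) (a b : Nat) (hab : a ≤ b) :
    fCount (batch.take b) - fCount (batch.take a) = fCount ((batch.drop a).take (b - a)) := by
  have h : batch.take b = batch.take a ++ (batch.drop a).take (b - a) := by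
    rw [← List.take_add]
    congr 1
    omega
  rw [h, fCount, List.countP_append]
  simp [fCount]

theorem batch_stop4_big (l : List Bool) (hb : ¬ l.length ≤ 4) :
    batch_stop4 l =
      (if runbatch (l.take (l.length / 2)) = false then batch_stop4 (l.take (l.length / 2)) else 0)
      + (if runbatch (l.drop (l.length / 2)) = false then batch_stop4 (l.drop (l.length / 2)) else 0)
      + 2 := by
  rw [batch_stop4]
  simp only [hb, if_false, pv_slice_right, pv_slice_left]

theorem count_eq (batch : List Bool) (k lo hi : Nat) (hk : hi - lo ≤ k)
    (hlh : lo ≤ hi) (hhi : hi ≤ batch.length) :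
    countAlt (prefLoop [0] 0 batch) lo hi = batch_stop4 ((batch.drop lo).take (hi - lo)) := by
  induction k generalizing lo hi with
  | zero =>
    have h0 : hi - lo = 0 := by omega
    rw [countAlt]
    simp [h0, batch_stop4]
  | succ k ih =>
    set seg := (batch.drop lo).take (hi - lo) with hseg
    have hlen : seg.length = hi - lo := by
      simp [hseg]; omega
    by_cases hsmall : hi - lo ≤ 4
    · rw [countAlt]
      simp only [hsmall, if_true]
      rw [batch_stop4]
      simp [hlen, hsmall]
    · have hln : 5 ≤ hi - lo := by omega
      set mid := lo + (hi - lo) / 2 with hmid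
      have hm1 : lo ≤ mid := by omega
      have hm2 : mid ≤ hi := by omega
      have htake : seg.take (seg.length / 2) = (batch.drop lo).take (mid - lo) := by
        rw [hlen, hseg, List.take_take]
        congr 1
        omega
      have hdrop : seg.drop (seg.length / 2) = (batch.drop mid).take (hi - mid) := by
        rw [hlen, hseg, List.drop_take, List.drop_drop]
        congr 1 <;> omega
      have hcondR : ((prefLoop [0] 0 batch).getD mid 0 - (prefLoop [0] 0 batch).getD lo 0 > 0)
          ↔ runbatch (seg.take (seg.length / 2)) = false := by
        rw [pref_getD batch mid (by omega), pref_getD batch lo (by omega),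
          fCount_sub batch lo mid hm1, htake, runbatch_false_iff]
      have hcondL : ((prefLoop [0] 0 batch).getD hi 0 - (prefLoop [0] 0 batch).getD mid 0 > 0)
          ↔ runbatch (seg.drop (seg.length / 2)) = false := by
        rw [pref_getD batch hi hhi, pref_getD batch mid (by omega),
          fCount_sub batch mid hi hm2, hdrop, runbatch_false_iff]
      have ihR : countAlt (prefLoop [0] 0 batch) lo mid = batch_stop4 (seg.take (seg.length / 2)) := by
        rw [htake]
        exact ih lo mid (by omega) (by omega) (by omega)
      have ihL : countAlt (prefLoop [0] 0 batch) mid hi = batch_stop4 (seg.drop (seg.length / 2)) := by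
        rw [hdrop]
        exact ih mid hi (by omega) (by omega) (by omega)
      rw [countAlt]
      simp only [← hmid, hsmall, if_false]
      rw [batch_stop4_big seg (by omega)]
      by_cases c1 : runbatch (seg.take (seg.length / 2)) = false
      · have d1 : (prefLoop [0] 0 batch).getD mid 0 - (prefLoop [0] 0 batch).getD lo 0 > 0 :=
          hcondR.mpr c1
        by_cases c2 : runbatch (seg.drop (seg.length / 2)) = false
        · have d2 : (prefLoop [0] 0 batch).getD hi 0 - (prefLoop [0] 0 batch).getD mid 0 > 0 :=
            hcondL.mpr c2
          simp only [d1, d2, if_true, c1, c2, ihR, ihL]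
          ring
        · have d2 : ¬ ((prefLoop [0] 0 batch).getD hi 0 - (prefLoop [0] 0 batch).getD mid 0 > 0) :=
            fun h => c2 (hcondL.mp h)
          simp only [d1, d2, if_true, if_false, c1, c2, ihR]
          simp
          ring
      · have d1 : ¬ ((prefLoop [0] 0 batch).getD mid 0 - (prefLoop [0] 0 batch).getD lo 0 > 0) :=
          fun h => c1 (hcondR.mp h)
        by_cases c2 : runbatch (seg.drop (seg.length / 2)) = false
        · have d2 : (prefLoop [0] 0 batch).getD hi 0 - (prefLoop [0] 0 batch).getD mid 0 > 0 :=
            hcondL.mpr c2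
          simp only [d1, d2, if_true, if_false, c1, c2, ihL]
          simp
          ring
        · have d2 : ¬ ((prefLoop [0] 0 batch).getD hi 0 - (prefLoop [0] 0 batch).getD mid 0 > 0) :=
            fun h => c2 (hcondL.mp h)
          simp only [d1, d2, if_false, c1, c2]
          simp

-- ===== VERDICT (by name: the statement is the Claim_ definition above) =====
theorem batch_stop4_spec : Claim_equal_batch_stop4 := by
  intro batch _
  unfold Spec_batch_stop4 batch_stop4_alt
  rw [count_eq batch batch.length 0 batch.length (by omega) (by omega) (by omega)]
  simp
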